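-- pv_equiv track=rewrite | github.com/khelwood/advent-of-code | 2017/09_stream.py | remove_junk
-- ===== SOURCE A (Python) =====
-- def remove_junk(text):
--     output = []
--     j = 0
--     i = text.find('<')
--     while i >= 0:
--         if i>j:
--             output.append(text[j:i])
--         j = find_junk_end(text, i)+1
--         i = text.find('<', j)
--     if j < len(text):
--         output.append(text[j:])
--     return ''.join(output)
--
-- def find_junk_end(text, start):
--     i = start
--     while True:
--         ch = text[i]
--         if ch=='>':
--             return i
--         i += 1 + (ch=='!')
-- ===== SOURCE B (Python) =====
-- def remove_junk(text):
--     out = []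
--     state = 'normal'
--     for ch in text:
--         if state == 'normal':
--             if ch == '<':
--                 state = 'junk'
--             else:
--                 out.append(ch)
--         elif state == 'junk':
--             if ch == '>':
--                 state = 'normal'
--             elif ch == '!':
--                 state = 'escape'
--         else:  # escape: the escaped character is dropped
--             state = 'junk'
--     return ''.join(out)
-- ===== Notes on version B (the rewrite author's own statement) =====
-- stated objective: simpler
-- what changed: A repeatedly calls str.find('<') and a separate junk-end helper that jumps indices (skipping escaped characters) and joins the slices between junk sections; B is one uniform character-at-a-time scan with a three-state machine (normal/junk/escape) that appends kept characters.
-- crash fix: On inputs with an unterminated junk section (a '<' never closed by an unescaped '>', including a trailing '!' inside junk) A raises IndexError; B returns the text with every junk section, terminated or not, removed. — e.g. on remove_junk("ab<c"): A raises IndexError, B returns "ab"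
import Mathlib
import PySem

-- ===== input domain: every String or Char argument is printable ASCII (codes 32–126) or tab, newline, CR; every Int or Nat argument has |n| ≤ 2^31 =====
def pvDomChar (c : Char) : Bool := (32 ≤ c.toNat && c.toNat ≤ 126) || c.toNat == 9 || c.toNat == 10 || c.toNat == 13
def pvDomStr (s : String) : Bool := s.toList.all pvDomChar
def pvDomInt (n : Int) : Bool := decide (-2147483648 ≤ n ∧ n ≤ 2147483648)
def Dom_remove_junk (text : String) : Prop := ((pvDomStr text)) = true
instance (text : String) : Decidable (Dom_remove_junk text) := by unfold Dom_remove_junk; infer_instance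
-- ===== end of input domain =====

-- B replaces A's find-and-jump index scan (str.find for '<' plus a junk-end helper with escape
-- jumps) by a single left-to-right fold with a three-state machine (normal/junk/escape);
-- objective: simpler. Pre_ excludes inputs with unterminated junk, where A raises IndexError;
-- there B returns the stripped text (Raises_ block).


-- ===== PORT A =====

-- termination facts for the ports (cited in decreasing_by)
theorem pvFindFrom_gt_len (l sub : List Char) (j : Nat) (h : l.length < j) :
    PySem.Chars.findFrom l sub (j : Int) none = -1 := by
  simp only [PySem.Chars.findFrom]
  have h0 : ¬ ((j : Int) < 0) := by omega
  simp only [h0, if_false]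
  rw [if_pos (by exact_mod_cast h)]

theorem pvFindFrom_ge_start (l sub : List Char) (j : Nat)
    (h : 0 ≤ PySem.Chars.findFrom l sub (j : Int) none) :
    (j : Int) ≤ PySem.Chars.findFrom l sub (j : Int) none := by
  by_cases hj : j ≤ l.length
  · exact (PySem.Chars.findFrom_natCast_spec l sub j hj (by intro hc; rw [hc] at h; norm_num at h)).1
  · rw [pvFindFrom_gt_len l sub j (by omega)] at h; norm_num at h

-- port of find_junk_end: index of the closing '>', none exactly where Python raises IndexError
-- (ch = text[i] is l[i] while i is in range; out of range is the IndexError)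
def junkEnd (l : List Char) (i : Nat) : Option Nat :=
  if h : i < l.length then
    if l[i] = '>' then some i else junkEnd l (i + 1 + (if l[i] = '!' then 1 else 0))
  else none
  termination_by l.length - i
  decreasing_by
    exact Nat.sub_lt_sub_left h
      (Nat.lt_of_lt_of_le (Nat.lt_succ_self i) (Nat.le_add_right (i + 1) _))

theorem pvJunkEnd_some (l : List Char) : ∀ (n i e : Nat), l.length ≤ i + n →
    junkEnd l i = some e → i ≤ e ∧ e < l.length := by
  intro n
  induction n with
  | zero =>
    intro i e hn h
    rw [junkEnd, dif_neg (by omega)] at h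
    simp at h
  | succ n ih =>
    intro i e hn h
    by_cases hi : i < l.length
    · rw [junkEnd, dif_pos hi] at h
      by_cases hg : l[i] = '>'
      · rw [if_pos hg] at h; cases h; exact ⟨le_refl _, hi⟩
      · rw [if_neg hg] at h
        have := ih (i + 1 + (if l[i] = '!' then 1 else 0)) e (by split <;> omega) h
        constructor <;> omega
    · rw [junkEnd, dif_neg hi] at h; simp at h

-- port of remove_junk's while-loop: state = (output, j); each iteration recomputes
-- i = text.find('<', j) at the loop head (the initial find from 0 equals text.find('<'))
def loopA (l : List Char) (output : List (List Char)) (j : Nat) : List (List Char) :=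
  let i := PySem.Chars.findFrom l ['<'] (j : Int) none
  if hi : 0 ≤ i then
    let output' := if i.toNat > j then output ++ [PySem.List.slice l (some (j : Int)) (some i)]
                   else output
    match he : junkEnd l i.toNat with
    | some e => loopA l output' (e + 1)
    | none => output'     -- Python raises IndexError inside find_junk_end here; outside Pre_
  else
    if j < l.length then output ++ [PySem.List.slice l (some (j : Int)) none] else output
  termination_by l.length + 1 - j
  decreasing_by
    have h1 : (j : Int) ≤ i := pvFindFrom_ge_start l ['<'] j hi
    have h2 := pvJunkEnd_some l l.length i.toNat e (Nat.le_add_left _ _) he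
    have h3 : j ≤ i.toNat := by rwa [← Int.toNat_of_nonneg hi, Int.ofNat_le] at h1
    exact Nat.sub_lt_sub_left
      (Nat.lt_succ_of_le (Nat.le_of_lt (Nat.lt_of_le_of_lt (Nat.le_trans h3 h2.1) h2.2)))
      (Nat.lt_succ_of_le (Nat.le_trans h3 h2.1))

def remove_junk (text : String) : String :=
  String.ofList (loopA text.toList [] 0).flatten    -- ''.join(output)

-- ===== PORT B =====

inductive PvSt where
  | normal | junk | escape
deriving DecidableEq, Repr

-- one step of B's state machine: (state, out) updated by the next character
def stepB : PvSt × List Char → Char → PvSt × List Char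
  | (.normal, out), ch => if ch = '<' then (.junk, out) else (.normal, out ++ [ch])
  | (.junk, out), ch => if ch = '>' then (.normal, out) else if ch = '!' then (.escape, out) else (.junk, out)
  | (.escape, out), _ => (.junk, out)

def remove_junk_alt (text : String) : String :=
  String.ofList (text.toList.foldl stepB (PvSt.normal, [])).2    -- ''.join(out)

-- ===== PRECONDITION & SPEC =====

-- well-formedness of the stream, read with state st (0 = outside junk, 1 = inside junk,
-- 2 = inside junk just after '!'): well-formed iff the scan ends outside junk, i.e. every
-- junk section opened by '<' is closed by an unescaped '>'. Exactly the inputs on which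
-- the Python A returns (elsewhere find_junk_end runs past the end and raises IndexError).
def pvWfGo : List Char → Nat → Bool
  | [], st => st == 0
  | c :: r, st =>
    pvWfGo r (if st == 0 then (if c = '<' then 1 else 0)
              else if st == 1 then (if c = '>' then 0 else if c = '!' then 2 else 1)
              else 1)

def Pre_remove_junk (text : String) : Prop := pvWfGo text.toList 0 = true
instance (text : String) : Decidable (Pre_remove_junk text) := by unfold Pre_remove_junk; infer_instance
def pvWitness_remove_junk : String := "a<b!>>c"

-- On streams with an unterminated junk section (or a trailing '!') A raises IndexError; B returns the text with every junk section (terminated or not) removed.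
def Raises_remove_junk (text : String) : Prop := pvWfGo text.toList 0 = false
instance (text : String) : Decidable (Raises_remove_junk text) := by unfold Raises_remove_junk; infer_instance
def pvRaiseWitness_remove_junk : String := "ab<c"
def pvRaiseWitnessOut_remove_junk : String := "ab"

def Spec_remove_junk (text : String) (out : String) : Prop := out = remove_junk_alt text
instance (text : String) (out : String) : Decidable (Spec_remove_junk text out) := by unfold Spec_remove_junk; infer_instance

-- ===== CLAIM (what is proved, stated in full; the proofs are below) =====
def Claim_equal_remove_junk : Prop := ∀ (text : String), Dom_remove_junk text → Pre_remove_junk text → Spec_remove_junk text (remove_junk text)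
def Claim_raises_remove_junk : Prop := (∀ (text : String), Dom_remove_junk text → Raises_remove_junk text → ¬ Pre_remove_junk text) ∧ (Dom_remove_junk (pvRaiseWitness_remove_junk) ∧ Raises_remove_junk (pvRaiseWitness_remove_junk) ∧ remove_junk_alt (pvRaiseWitness_remove_junk) = pvRaiseWitnessOut_remove_junk)

-- ===== LEMMAS AND PROOFS =====

-- reference stripping functions (proof device linking the two ports)
mutual
def pvStrip : List Char → List Char
  | [] => []
  | c :: r => if c = '<' then pvStripJ r else c :: pvStrip r
def pvStripJ : List Char → List Char
  | [] => []
  | c :: r => if c = '>' then pvStrip r else if c = '!' then pvStripE r else pvStripJ r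
def pvStripE : List Char → List Char
  | [] => []
  | _ :: r => pvStripJ r
end

def pvStripOf : PvSt → List Char → List Char
  | .normal => pvStrip
  | .junk => pvStripJ
  | .escape => pvStripE

-- two-level restatement of pvWfGo (proof device: the shape pvJunk_lemma recurses on)
mutual
def pvWf : List Char → Bool
  | [] => true
  | c :: r => if c = '<' then pvJunkOk r else pvWf r
def pvJunkOk : List Char → Bool
  | [] => false
  | c :: r =>
    if c = '>' then pvWf r
    else if c = '!' then (match r with | [] => false | _ :: r' => pvJunkOk r')
    else pvJunkOk r
end

theorem pvWf_cons (c : Char) (r : List Char) :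
    pvWf (c :: r) = if c = '<' then pvJunkOk r else pvWf r := by
  rw [pvWf.eq_def]

-- B's fold computes pvStrip
theorem pvFoldB (l : List Char) : ∀ (st : PvSt) (out : List Char),
    (l.foldl stepB (st, out)).2 = out ++ pvStripOf st l := by
  induction l with
  | nil => intro st out; cases st <;> simp [pvStripOf, pvStrip, pvStripJ, pvStripE]
  | cons c r ih =>
    intro st out
    cases st <;> simp only [List.foldl_cons, stepB, pvStripOf, pvStrip, pvStripJ, pvStripE]
    · by_cases h : c = '<' <;> simp [h, ih, pvStripOf]
    · by_cases h1 : c = '>'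
      · simp [h1, ih, pvStripOf]
      · by_cases h2 : c = '!' <;> simp [h1, h2, ih, pvStripOf]
    · simp [ih, pvStripOf]

theorem pvAltEq (text : String) : remove_junk_alt text = String.ofList (pvStrip text.toList) := by
  rw [remove_junk_alt, pvFoldB text.toList PvSt.normal []]; rfl

-- no '<' in s: pvStrip is the identity
theorem pvStrip_no_lt (s : List Char) (h : '<' ∉ s) : pvStrip s = s := by
  induction s with
  | nil => rfl
  | cons c r ih =>
    have hc : c ≠ '<' := fun hc => h (hc ▸ List.mem_cons_self)
    simp [pvStrip, hc, ih (fun hm => h (List.mem_cons_of_mem _ hm))]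

theorem pvStrip_split (s r : List Char) (h : '<' ∉ s) :
    pvStrip (s ++ '<' :: r) = s ++ pvStripJ r := by
  induction s with
  | nil => simp [pvStrip]
  | cons c t ih =>
    have hc : c ≠ '<' := fun hc => h (hc ▸ List.mem_cons_self)
    simp [pvStrip, hc, ih (fun hm => h (List.mem_cons_of_mem _ hm))]

theorem pvWf_split (s r : List Char) (h : '<' ∉ s) :
    pvWf (s ++ '<' :: r) = pvJunkOk r := by
  induction s with
  | nil => simp [pvWf]
  | cons c t ih =>
    have hc : c ≠ '<' := fun hc => h (hc ▸ List.mem_cons_self)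
    simp [pvWf, hc, ih (fun hm => h (List.mem_cons_of_mem _ hm))]

theorem pvSingleton_infix {a : Char} {s : List Char} (h : a ∈ s) : [a] <:+: s := by
  obtain ⟨t, u, rfl⟩ := List.append_of_mem h
  exact ⟨t, u, by simp⟩

-- no '<' strictly before position k (positions ≥ j): the slice text[j:k] has no '<'
theorem pvTake_not_mem (l : List Char) : ∀ (d j k : Nat), k - j ≤ d →
    (∀ m, j ≤ m → m < k → ¬ ['<'] <+: l.drop m) → '<' ∉ (l.drop j).take (k - j) := by
  intro d
  induction d with
  | zero => intro j k hd _; rw [Nat.le_zero.mp hd]; simp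
  | succ d ih =>
    intro j k hd hmin
    by_cases hjk : j < k
    · by_cases hjl : j < l.length
      · have hdrop : l.drop j = l[j] :: l.drop (j + 1) := List.drop_eq_getElem_cons hjl
        have hkj : k - j = (k - (j + 1)) + 1 := by omega
        rw [hdrop, hkj, List.take_succ_cons]
        intro hmem
        rcases List.mem_cons.mp hmem with hhd | htl
        · refine hmin j (le_refl _) hjk ?_
          rw [hdrop, ← hhd]
          simp [List.cons_prefix_cons]
        · exact ih (j + 1) k (by omega) (fun m hm1 hm2 => hmin m (by omega) hm2) htl
      · rw [List.drop_eq_nil_of_le (by omega)] at *; simp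
    · have : k - j = 0 := by omega
      rw [this]; simp

theorem pvLoopA_high (l : List Char) (output : List (List Char)) (j : Nat) (h : l.length < j) :
    loopA l output j = output := by
  rw [loopA]
  simp only [pvFindFrom_gt_len l ['<'] j h]
  norm_num
  omega

theorem pvJunkOk_cons (c : Char) (r : List Char) :
    pvJunkOk (c :: r) = if c = '>' then pvWf r
      else if c = '!' then (match r with | [] => false | _ :: r' => pvJunkOk r')
      else pvJunkOk r := by
  rw [pvJunkOk.eq_def]

theorem pvWfGo_eq (l : List Char) : pvWfGo l 0 = pvWf l ∧ pvWfGo l 1 = pvJunkOk l ∧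
    pvWfGo l 2 = (match l with | [] => false | _ :: r => pvJunkOk r) := by
  induction l with
  | nil => exact ⟨rfl, rfl, rfl⟩
  | cons c r ih =>
    obtain ⟨ih0, ih1, ih2⟩ := ih
    refine ⟨?_, ?_, ?_⟩
    · by_cases hc : c = '<' <;> simp [pvWfGo, pvWf_cons, hc, ih0, ih1]
    · by_cases h1 : c = '>'
      · simp [pvWfGo, pvJunkOk_cons, h1, ih0]
      · by_cases h2 : c = '!'
        · simp [pvWfGo, pvJunkOk_cons, h1, h2, ih2]
        · simp [pvWfGo, pvJunkOk_cons, h1, h2, ih1]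
    · simp [pvWfGo, ih1]

-- on a well-formed junk tail, junkEnd finds the closing '>' and the strip functions line up
theorem pvJunk_lemma (l : List Char) : ∀ (n p : Nat), l.length ≤ p + n → pvJunkOk (l.drop p) = true →
    ∃ e, junkEnd l p = some e ∧ pvStripJ (l.drop p) = pvStrip (l.drop (e + 1)) ∧
      pvWf (l.drop (e + 1)) = true := by
  intro n
  induction n with
  | zero =>
    intro p hn hj
    rw [List.drop_eq_nil_of_le (by omega)] at hj
    simp [pvJunkOk] at hj
  | succ n ih =>
    intro p hn hj
    by_cases hp : p < l.length
    · have hdrop : l.drop p = l[p] :: l.drop (p + 1) := List.drop_eq_getElem_cons hp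
      by_cases hgt : l[p] = '>'
      · refine ⟨p, ?_, ?_, ?_⟩
        · rw [junkEnd, dif_pos hp, if_pos hgt]
        · rw [hdrop]; simp [pvStripJ, hgt]
        · rw [hdrop, pvJunkOk_cons, if_pos hgt] at hj
          exact hj
      · by_cases hbang : l[p] = '!'
        · by_cases hp1 : p + 1 < l.length
          · have hdrop1 : l.drop (p + 1) = l[p + 1] :: l.drop (p + 2) := List.drop_eq_getElem_cons hp1
            have hj2 : pvJunkOk (l.drop (p + 2)) = true := by
              rw [hdrop, hdrop1, pvJunkOk_cons, if_neg hgt, if_pos hbang] at hj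
              exact hj
            obtain ⟨e, he, hs, hw⟩ := ih (p + 2) (by omega) hj2
            refine ⟨e, ?_, ?_, hw⟩
            · rw [junkEnd, dif_pos hp, if_neg hgt, if_pos hbang,
                show p + 1 + 1 = p + 2 from rfl]
              exact he
            · rw [hdrop, hdrop1]
              simp only [pvStripJ, pvStripE, if_neg hgt, if_pos hbang]
              exact hs
          · rw [hdrop, List.drop_eq_nil_of_le (by omega)] at hj
            simp [pvJunkOk, hbang] at hj
        · have hj2 : pvJunkOk (l.drop (p + 1)) = true := by
            rw [hdrop, pvJunkOk_cons, if_neg hgt, if_neg hbang] at hj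
            exact hj
          obtain ⟨e, he, hs, hw⟩ := ih (p + 1) (by omega) hj2
          refine ⟨e, ?_, ?_, hw⟩
          · rw [junkEnd, dif_pos hp, if_neg hgt, if_neg hbang]
            simpa using he
          · rw [hdrop]
            simp only [pvStripJ, if_neg hgt, if_neg hbang]
            exact hs
    · rw [List.drop_eq_nil_of_le (by omega)] at hj
      simp [pvJunkOk] at hj

-- main loop lemma: under well-formedness the find/jump loop accumulates exactly pvStrip
theorem pvLoopA (l : List Char) : ∀ (n j : Nat) (output : List (List Char)),
    l.length + 1 ≤ j + n → pvWf (l.drop j) = true →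
    (loopA l output j).flatten = output.flatten ++ pvStrip (l.drop j) := by
  intro n
  induction n with
  | zero =>
    intro j output hn hwf
    rw [pvLoopA_high l output j (by omega), List.drop_eq_nil_of_le (by omega)]
    simp [pvStrip]
  | succ n ih =>
    intro j output hn hwf
    by_cases hj : j ≤ l.length
    · by_cases hneg : PySem.Chars.findFrom l ['<'] (j : Int) none = -1
      · have hnin : ¬ ['<'] <:+: l.drop j :=
          (PySem.Chars.findFrom_natCast_eq_neg_one_iff l ['<'] j hj).mp hneg
        have hmem : '<' ∉ l.drop j := fun hm => hnin (pvSingleton_infix hm)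
        rw [loopA]
        simp only [hneg]
        norm_num
        by_cases hlt : j < l.length
        · rw [if_pos hlt]
          simp [pvStrip_no_lt _ hmem]
        · rw [if_neg hlt, List.drop_eq_nil_of_le (by omega)]
          simp [pvStrip]
      · obtain ⟨hle, hpre, hmin⟩ := PySem.Chars.findFrom_natCast_spec l ['<'] j hj hneg
        have hF0 : 0 ≤ PySem.Chars.findFrom l ['<'] (j : Int) none := le_trans (by positivity) hle
        set F := PySem.Chars.findFrom l ['<'] (j : Int) none with hFdef
        set k := F.toNat with hkdef
        have hFk : F = (k : Int) := (Int.toNat_of_nonneg hF0).symm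
        have hjk : j ≤ k := by omega
        have hk : k < l.length := by
          by_contra hge
          rw [List.drop_eq_nil_of_le (by omega)] at hpre
          simp at hpre
        have hdropk : l.drop k = l[k] :: l.drop (k + 1) := List.drop_eq_getElem_cons hk
        have hck : l[k] = '<' := by
          rw [hdropk] at hpre
          exact (List.cons_prefix_cons.mp hpre).1.symm
        have htake : '<' ∉ (l.drop j).take (k - j) :=
          pvTake_not_mem l (k - j) j k (le_refl _) (fun m h1 h2 => hmin m h1 h2)
        have hsplit : l.drop j = (l.drop j).take (k - j) ++ '<' :: l.drop (k + 1) := by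
          conv_lhs => rw [← List.take_append_drop (k - j) (l.drop j)]
          rw [List.drop_drop, show j + (k - j) = k from by omega, hdropk, hck]
        have hjunk : pvJunkOk (l.drop (k + 1)) = true := by
          rw [hsplit, pvWf_split _ _ htake] at hwf
          exact hwf
        obtain ⟨e, he, hsJ, hwf'⟩ := pvJunk_lemma l l.length (k + 1) (by omega) hjunk
        have hJE : junkEnd l k = some e := by
          rw [junkEnd, dif_pos hk, if_neg (by rw [hck]; decide), if_neg (by rw [hck]; decide)]
          simpa using he
        have hkee := pvJunkEnd_some l l.length k e (by omega) hJE
        have hout' : ∀ output' : List (List Char),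
            output' = (if k > j then output ++ [PySem.List.slice l (some (j : Int)) (some (k : Int))] else output) →
            output'.flatten = output.flatten ++ (l.drop j).take (k - j) := by
          intro output' hdef
          by_cases hkj : k > j
          · rw [hdef, if_pos hkj]
            simp [PySem.List.slice_natCast]
          · have hkj' : k = j := by omega
            rw [hdef, if_neg hkj, hkj']
            simp
        rw [loopA]
        simp only [← hFdef, hFk, Int.toNat_natCast]
        rw [dif_pos (by exact_mod_cast Int.natCast_nonneg k)]
        split
        · rename_i e' he'
          rw [hJE] at he'
          injection he' with hee
          subst hee
          rw [ih (e + 1) _ (by omega) hwf']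
          rw [hout' _ rfl]
          conv_rhs => rw [hsplit, pvStrip_split _ _ htake, hsJ]
          simp [List.append_assoc]
        · rename_i he'
          rw [hJE] at he'
          simp at he'
    · rw [pvLoopA_high l output j (by omega), List.drop_eq_nil_of_le (by omega)]
      simp [pvStrip]

theorem remove_junk_spec : Claim_equal_remove_junk := by
  intro text _ hpre
  unfold Spec_remove_junk
  rw [pvAltEq, remove_junk]
  have hwf : pvWf text.toList = true := by
    rw [← (pvWfGo_eq text.toList).1]; exact hpre
  have h := pvLoopA text.toList (text.toList.length + 1) 0 [] (by omega) (by simpa using hwf)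
  simp only [List.drop_zero] at h
  rw [h]
  simp

theorem remove_junk_raises : Claim_raises_remove_junk := by
  unfold Claim_raises_remove_junk
  refine ⟨?_, by decide, by decide, by decide⟩
  intro text _ hr hp
  unfold Raises_remove_junk at hr; unfold Pre_remove_junk at hp
  rw [hr] at hp; exact Bool.noConfusion hp

-- deliberate self-check that the raise-witness facts really are the ones remove_junk_raises certifies
theorem pvRaisesWitness_ok : Raises_remove_junk pvRaiseWitness_remove_junk ∧
    remove_junk_alt pvRaiseWitness_remove_junk = pvRaiseWitnessOut_remove_junk := by
  have h := remove_junk_raises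
  unfold Claim_raises_remove_junk at h
  exact ⟨h.2.2.1, h.2.2.2⟩
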